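-- pv_equiv track=rewrite | github.com/JusticeDAO-LLC/complaint-generator | mediator/legal_hooks.py | _parse_statutes
-- ===== SOURCE A (Python) =====
-- from typing import Dict, List, Optional, Any
--
-- def _parse_statutes(response: str) -> List[Dict[str, str]]:
--     """Parse statute information from LLM response."""
--     statutes = []
--     current_statute = {}
--
--     sections = response.split('---')
--     for section in sections:
--         lines = section.strip().split('\n')
--         for line in lines:
--             line = line.strip()
--             if line.startswith('STATUTE:'):
--                 if current_statute:
--                     statutes.append(current_statute)
--                 current_statute = {'citation': line.replace('STATUTE:', '').strip()}
--             elif line.startswith('TITLE:'):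
--                 current_statute['title'] = line.replace('TITLE:', '').strip()
--             elif line.startswith('RELEVANCE:'):
--                 current_statute['relevance'] = line.replace('RELEVANCE:', '').strip()
--
--     if current_statute:
--         statutes.append(current_statute)
--
--     return statutes
-- ===== SOURCE B (Python) =====
-- def _parse_statutes(response):
--     """Parse statute records: tokenize, cut into blocks at STATUTE: lines, build one dict per block."""
--     tokens = [ln.strip()
--               for sec in response.split('---')
--               for ln in sec.strip().split('\n')]
--     # partition: a new block starts immediately before every STATUTE: token
--     blocks = [[]]
--     for t in tokens:
--         if t.startswith('STATUTE:'):
--             blocks.append([t])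
--         else:
--             blocks[-1].append(t)
--     result = []
--     for block in blocks:
--         d = {}
--         for t in block:
--             if t.startswith('STATUTE:'):
--                 d['citation'] = t.replace('STATUTE:', '').strip()
--             elif t.startswith('TITLE:'):
--                 d['title'] = t.replace('TITLE:', '').strip()
--             elif t.startswith('RELEVANCE:'):
--                 d['relevance'] = t.replace('RELEVANCE:', '').strip()
--         if d:
--             result.append(d)
--     return result
-- ===== Notes on version B (the rewrite author's own statement) =====
-- stated objective: alternative
-- what changed: A threads (statutes, current_statute) mutable state through one nested pass; B first tokenizes, then partitions the token list into blocks cut before each STATUTE: line, then builds one dict per block and keeps the non-empty ones.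
import Mathlib
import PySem

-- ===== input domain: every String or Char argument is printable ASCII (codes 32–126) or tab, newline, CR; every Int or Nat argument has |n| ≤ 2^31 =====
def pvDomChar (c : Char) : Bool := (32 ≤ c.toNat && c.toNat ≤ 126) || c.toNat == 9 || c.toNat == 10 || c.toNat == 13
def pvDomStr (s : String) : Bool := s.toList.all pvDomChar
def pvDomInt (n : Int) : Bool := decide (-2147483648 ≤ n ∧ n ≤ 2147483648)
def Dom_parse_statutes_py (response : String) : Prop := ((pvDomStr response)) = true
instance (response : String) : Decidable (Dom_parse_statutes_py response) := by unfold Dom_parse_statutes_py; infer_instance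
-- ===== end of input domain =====

-- B re-decomposes A's single stateful pass as tokenize → cut into blocks at STATUTE: lines → build one dict per block (objective: alternative decomposition, same cost); same return value proved.

-- ===== PORT A =====
-- literal port of A: one pass over sections/lines with (statutes, current_statute) state.
-- '.split(sep)' with the nonempty literal seps '---'/'\n' never raises, so Str.split? is always `some`; `.getD []` only unwraps it.
def parse_statutes_py (response : String) : List (List (String × String)) :=
  let sections := (PySem.Str.split? response "---").getD []
  let r := sections.foldl (fun st sec =>
    let lines := (PySem.Str.split? (PySem.Str.strip sec) "\n").getD []
    lines.foldl (fun st line0 =>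
      let line := PySem.Str.strip line0
      if PySem.Str.startswith line "STATUTE:" then
        let statutes := if st.2.items.isEmpty then st.1 else st.1 ++ [st.2]
        (statutes, PySem.Dict.ofList [("citation", PySem.Str.strip (PySem.Str.replace line "STATUTE:" ""))])
      else if PySem.Str.startswith line "TITLE:" then
        (st.1, st.2.insert "title" (PySem.Str.strip (PySem.Str.replace line "TITLE:" "")))
      else if PySem.Str.startswith line "RELEVANCE:" then
        (st.1, st.2.insert "relevance" (PySem.Str.strip (PySem.Str.replace line "RELEVANCE:" "")))
      else st) st)
    (([] : List (PySem.Dict String String)), PySem.Dict.empty)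
  let statutes := if r.2.items.isEmpty then r.1 else r.1 ++ [r.2]
  statutes.map (·.items)

-- ===== PORT B =====
-- B's per-token dict update (the body of Source B's per-block loop)
def pvParseTok (d : PySem.Dict String String) (t : String) : PySem.Dict String String :=
  if PySem.Str.startswith t "STATUTE:" then
    d.insert "citation" (PySem.Str.strip (PySem.Str.replace t "STATUTE:" ""))
  else if PySem.Str.startswith t "TITLE:" then
    d.insert "title" (PySem.Str.strip (PySem.Str.replace t "TITLE:" ""))
  else if PySem.Str.startswith t "RELEVANCE:" then
    d.insert "relevance" (PySem.Str.strip (PySem.Str.replace t "RELEVANCE:" ""))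
  else d

def parse_statutes_py_alt (response : String) : List (List (String × String)) :=
  let tokens := ((PySem.Str.split? response "---").getD []).flatMap
      (fun sec => ((PySem.Str.split? (PySem.Str.strip sec) "\n").getD []).map PySem.Str.strip)
  let blocks := tokens.foldl (fun bs t =>
      if PySem.Str.startswith t "STATUTE:" then bs ++ [[t]]
      else bs.dropLast ++ [(bs.getLast?.getD []) ++ [t]]) [[]]
  (((blocks.map (fun b => b.foldl pvParseTok PySem.Dict.empty)).filter
      (fun d => !d.items.isEmpty)).map (·.items))

-- ===== PRECONDITION & SPEC =====
def Spec_parse_statutes_py (response : String) (out : List (List (String × String))) : Prop := out = parse_statutes_py_alt response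
instance (response : String) (out : List (List (String × String))) : Decidable (Spec_parse_statutes_py response out) := by unfold Spec_parse_statutes_py; infer_instance

-- ===== CLAIM (what is proved, stated in full; the proofs are below) =====
def Claim_equal_parse_statutes_py : Prop := ∀ (response : String), Dom_parse_statutes_py response → Spec_parse_statutes_py response (parse_statutes_py response)

-- ===== LEMMAS AND PROOFS =====

-- A's inner-loop body on an already-stripped line
def pvStepA (st : List (PySem.Dict String String) × PySem.Dict String String) (line : String) :
    List (PySem.Dict String String) × PySem.Dict String String :=
  if PySem.Str.startswith line "STATUTE:" then
    ((if st.2.items.isEmpty then st.1 else st.1 ++ [st.2]),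
     PySem.Dict.ofList [("citation", PySem.Str.strip (PySem.Str.replace line "STATUTE:" ""))])
  else if PySem.Str.startswith line "TITLE:" then
    (st.1, st.2.insert "title" (PySem.Str.strip (PySem.Str.replace line "TITLE:" "")))
  else if PySem.Str.startswith line "RELEVANCE:" then
    (st.1, st.2.insert "relevance" (PySem.Str.strip (PySem.Str.replace line "RELEVANCE:" "")))
  else st

def pvFinal (st : List (PySem.Dict String String) × PySem.Dict String String) :
    List (PySem.Dict String String) :=
  if st.2.items.isEmpty then st.1 else st.1 ++ [st.2]

-- functional form of B's block partition, completing the current block `cur`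
def pvBlocks (cur : List String) : List String → List (List String)
  | [] => [cur]
  | t :: ts =>
    if PySem.Str.startswith t "STATUTE:" then cur :: pvBlocks [t] ts
    else pvBlocks (cur ++ [t]) ts

def pvParse (b : List String) : PySem.Dict String String := b.foldl pvParseTok PySem.Dict.empty

theorem pv_foldl_flatMap {α β γ : Type} (f : γ → β → γ) (g : α → List β)
    (l : List α) (init : γ) :
    (l.flatMap g).foldl f init = l.foldl (fun acc x => (g x).foldl f acc) init := by
  induction l generalizing init with
  | nil => rfl
  | cons x xs ih => simp [List.flatMap_cons, List.foldl_append, ih]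

theorem pv_blocksFold (ts : List String) :
    ∀ (bs : List (List String)) (cur : List String),
    ts.foldl (fun bs t =>
      if PySem.Str.startswith t "STATUTE:" then bs ++ [[t]]
      else bs.dropLast ++ [(bs.getLast?.getD []) ++ [t]]) (bs ++ [cur])
      = bs ++ pvBlocks cur ts := by
  induction ts with
  | nil => intro bs cur; rfl
  | cons t ts ih =>
    intro bs cur
    simp only [List.foldl_cons, pvBlocks]
    by_cases h : PySem.Str.startswith t "STATUTE:" = true
    · rw [if_pos h, if_pos h,
        show bs ++ [cur] ++ [[t]] = (bs ++ [cur]) ++ [[t]] from rfl, ih]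
      simp
    · rw [if_neg h, if_neg h, List.dropLast_concat, List.getLast?_concat]
      simp only [Option.getD_some]
      exact ih bs (cur ++ [t])

theorem pv_main (ts : List String) :
    ∀ (S : List (PySem.Dict String String)) (cur : List String),
    pvFinal (ts.foldl pvStepA (S, pvParse cur))
      = S ++ ((pvBlocks cur ts).map pvParse).filter (fun d => !d.items.isEmpty) := by
  induction ts with
  | nil =>
    intro S cur
    simp only [List.foldl_nil, pvBlocks, List.map_cons, List.map_nil,
      List.filter_cons, List.filter_nil, pvFinal]
    cases hc : (pvParse cur).items.isEmpty <;> simp [hc]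
  | cons t ts ih =>
    intro S cur
    simp only [List.foldl_cons, pvBlocks]
    by_cases h : PySem.Str.startswith t "STATUTE:" = true
    · have hstep : pvStepA (S, pvParse cur) t
          = ((if (pvParse cur).items.isEmpty then S else S ++ [pvParse cur]), pvParse [t]) := by
        simp only [pvStepA, pvParse, List.foldl_cons, List.foldl_nil, pvParseTok, if_pos h]
        rfl
      rw [hstep, ih, if_pos h]
      simp only [List.map_cons, List.filter_cons]
      cases hc : (pvParse cur).items.isEmpty <;> simp [hc]
    · have hstep : pvStepA (S, pvParse cur) t = (S, pvParse (cur ++ [t])) := by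
        simp only [pvParse, List.foldl_append, List.foldl_cons, List.foldl_nil]
        simp only [pvStepA, pvParseTok, if_neg h]
        split_ifs <;> rfl
      rw [hstep, if_neg h, ih]

-- A's nested fold, re-read as the single fold of pvStepA over the flat token list
theorem pv_A_tokens (response : String) :
    parse_statutes_py response
      = (pvFinal ((((PySem.Str.split? response "---").getD []).flatMap
          (fun sec => ((PySem.Str.split? (PySem.Str.strip sec) "\n").getD []).map PySem.Str.strip)).foldl
            pvStepA ([], PySem.Dict.empty))).map (·.items) := by
  unfold parse_statutes_py pvFinal
  rw [pv_foldl_flatMap]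
  have hmap : ∀ (sec : String) (st : List (PySem.Dict String String) × PySem.Dict String String),
      (((PySem.Str.split? (PySem.Str.strip sec) "\n").getD []).map PySem.Str.strip).foldl pvStepA st
        = ((PySem.Str.split? (PySem.Str.strip sec) "\n").getD []).foldl
            (fun st line0 => pvStepA st (PySem.Str.strip line0)) st := by
    intro sec st; rw [List.foldl_map]
  simp only [hmap]
  rfl

-- B's imperative blocks[-1].append fold, re-read as the functional partition pvBlocks
theorem pv_B_blocks (response : String) :
    parse_statutes_py_alt response
      = ((((pvBlocks [] (((PySem.Str.split? response "---").getD []).flatMap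
          (fun sec => ((PySem.Str.split? (PySem.Str.strip sec) "\n").getD []).map PySem.Str.strip))).map
            pvParse).filter (fun d => !d.items.isEmpty)).map (·.items)) := by
  unfold parse_statutes_py_alt
  dsimp only
  rw [show ([[]] : List (List String)) = [] ++ [[]] from rfl, pv_blocksFold]
  rfl

-- ===== VERDICT (by name: the statement is the Claim_ definition above) =====
theorem parse_statutes_py_spec : Claim_equal_parse_statutes_py := by
  intro response _
  unfold Spec_parse_statutes_py
  rw [pv_A_tokens, pv_B_blocks]
  congr 1
  have hm := pv_main (((PySem.Str.split? response "---").getD []).flatMap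
      (fun sec => ((PySem.Str.split? (PySem.Str.strip sec) "\n").getD []).map PySem.Str.strip)) [] []
  rw [List.nil_append] at hm
  exact hm
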